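-- pv_equiv track=rewrite | github.com/ttvpro007/PythonProblems | labs109.py | count_growlers
-- ===== SOURCE A (Python) =====
-- def count_growlers(animals):
--     facing_left = ['cat', 'dog']
--     growler_count = 0
--
--     # brute force solution... let's go for a better solution maybe??? (0.7s)
--     # for i in range(len(animals)):
--     #     is_facing_left = animals[i] in facing_left
--     #     start_index = i + (1 if not is_facing_left else -1)
--     #     end_index = -1 if is_facing_left else len(animals)
--     #     step = -1 if is_facing_left else 1
--     #     dog_cat_diff = 0
--     #     for j in range(start_index, end_index, step):
--     #         dog_cat_diff += 1 if animals[j] in dogs else -1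
--     #     growler_count += 1 if dog_cat_diff > 0 else 0
--
--     # attempting for a faster solution (0.1s)
--     dogs_to_the_right = count_dogs(animals, len(animals) - 2, -1, -1)
--     dogs_to_the_left = count_dogs(animals, 1, len(animals), 1)
--
--     for i in range(len(animals)):
--         is_facing_left = animals[i] in facing_left
--         dog_cat_diff = dogs_to_the_left[i] if is_facing_left else dogs_to_the_right[i]
--         growler_count += 1 if dog_cat_diff > 0 else 0
--
--     return growler_count
--
-- def count_dogs(animals, start_index, end_index, step):
--
--     dogs, dog_counts = ['dog', 'god'], [0]
--     dog_count = 0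
--
--     for i in range(start_index, end_index, step):
--         dog_count += 1 if animals[i + -step] in dogs else -1
--
--         if step == -1:
--             dog_counts.insert(0, dog_count)
--
--         elif step == 1:
--             dog_counts.append(dog_count)
--
--     return dog_counts
-- ===== SOURCE B (Python) =====
-- def count_growlers(animals):
--     # One pass for the overall dog-cat difference, then one pass with a
--     # single running scalar; no helper function and no prefix/suffix lists.
--     total = sum(1 if a in ('dog', 'god') else -1 for a in animals)
--     count = 0
--     before = 0
--     for a in animals:
--         cur = 1 if a in ('dog', 'god') else -1
--         if a in ('cat', 'dog'):
--             if before > 0: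
--                 count += 1
--         else:
--             if total - before - cur > 0:
--                 count += 1
--         before += cur
--     return count
-- ===== Notes on version B (the rewrite author's own statement) =====
-- stated objective: faster
-- what changed: Replaces the count_dogs helper that materialises prefix and suffix difference lists (built with quadratic list.insert(0,...) plus an indexed lookup pass) by two plain passes over the list keeping only two scalar accumulators: the grand dog-cat difference and a running before-i difference.
import Mathlib
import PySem

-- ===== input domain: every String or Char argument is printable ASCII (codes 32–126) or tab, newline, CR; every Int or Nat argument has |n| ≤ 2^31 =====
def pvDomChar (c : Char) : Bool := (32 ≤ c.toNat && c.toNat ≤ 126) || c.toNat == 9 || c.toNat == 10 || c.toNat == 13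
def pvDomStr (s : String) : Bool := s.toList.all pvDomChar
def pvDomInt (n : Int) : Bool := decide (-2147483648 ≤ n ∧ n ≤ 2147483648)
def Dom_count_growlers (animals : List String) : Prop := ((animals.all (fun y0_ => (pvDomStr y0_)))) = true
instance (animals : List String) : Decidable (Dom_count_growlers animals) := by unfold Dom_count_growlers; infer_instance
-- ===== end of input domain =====

-- B replaces A's list-building helper (prefix/suffix difference lists built with
-- insert(0,..)/append plus an indexed lookup pass) by two plain passes over the list
-- keeping only two scalar accumulators; avoids the quadratic insert(0,..): faster.

-- ===== PORT A =====
-- helper count_dogs of A; animals[i + -step] is always in range at A's call sites,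
-- so pyGetD with a dummy default is exact there.
def count_dogs (animals : List String) (start_index end_index step : Int) : List Int :=
  let dogs : List String := ["dog", "god"]
  let st := (PySem.List.pyRange start_index end_index step).foldl
    (fun (st : List Int × Int) i =>
      let dog_count := st.2 + (if PySem.List.pyGetD animals (i + -step) "" ∈ dogs then 1 else -1)
      let dog_counts :=
        if step = -1 then PySem.List.insert st.1 0 dog_count
        else if step = 1 then st.1 ++ [dog_count]
        else st.1
      (dog_counts, dog_count))
    ([0], 0)
  st.1

def count_growlers (animals : List String) : Int :=
  let facing_left : List String := ["cat", "dog"]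
  let n : Int := animals.length
  let dogs_to_the_right := count_dogs animals (n - 2) (-1) (-1)
  let dogs_to_the_left := count_dogs animals 1 n 1
  (PySem.List.pyRange 0 n 1).foldl
    (fun growler_count i =>
      let is_facing_left := PySem.List.pyGetD animals i "" ∈ facing_left
      let dog_cat_diff := if is_facing_left then PySem.List.pyGetD dogs_to_the_left i 0
                          else PySem.List.pyGetD dogs_to_the_right i 0
      growler_count + (if dog_cat_diff > 0 then 1 else 0))
    0

-- ===== PORT B =====
def count_growlers_alt (animals : List String) : Int :=
  let total : Int := animals.foldl
    (fun t a => t + (if a ∈ (["dog", "god"] : List String) then 1 else -1)) 0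
  (animals.foldl
    (fun (st : Int × Int) a =>
      let cur : Int := if a ∈ (["dog", "god"] : List String) then 1 else -1
      let count := if a ∈ (["cat", "dog"] : List String) then
                     (if st.2 > 0 then st.1 + 1 else st.1)
                   else
                     (if total - st.2 - cur > 0 then st.1 + 1 else st.1)
      (count, st.2 + cur))
    (0, 0)).1

-- ===== PRECONDITION & SPEC =====
def Spec_count_growlers (animals : List String) (out : Int) : Prop := out = count_growlers_alt animals
instance (animals : List String) (out : Int) : Decidable (Spec_count_growlers animals out) := by unfold Spec_count_growlers; infer_instance

-- ===== CLAIM (what is proved, stated in full; the proofs are below) =====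
def Claim_equal_count_growlers : Prop := ∀ (animals : List String), Dom_count_growlers animals → Spec_count_growlers animals (count_growlers animals)

-- ===== LEMMAS AND PROOFS =====

-- +1 for a dog-word, -1 otherwise
def dogv (a : String) : Int := if a ∈ (["dog", "god"] : List String) then 1 else -1

-- dog-cat difference of the first k animals
def preD (animals : List String) (k : Nat) : Int :=
  (animals.take k).foldl (fun t a => t + dogv a) 0

-- dog-cat difference of the animals from index k on
def sufD (animals : List String) (k : Nat) : Int :=
  (animals.drop k).foldl (fun t a => t + dogv a) 0

lemma dog_shift (l : List String) (x : Int) :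
    l.foldl (fun t a => t + dogv a) x = x + l.foldl (fun t a => t + dogv a) 0 := by
  induction l generalizing x with
  | nil => simp
  | cons a l ih =>
      simp only [List.foldl_cons]
      rw [ih (x + dogv a), ih (0 + dogv a)]
      ring

lemma pre_succ (animals : List String) (k : Nat) (h : k < animals.length) :
    preD animals (k + 1) = preD animals k + dogv animals[k] := by
  unfold preD
  rw [List.take_add_one, List.getElem?_eq_getElem h]
  simp only [Option.toList_some, List.foldl_append, List.foldl_cons, List.foldl_nil]

lemma suf_succ (animals : List String) (k : Nat) (h : k < animals.length) :
    sufD animals k = dogv animals[k] + sufD animals (k + 1) := by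
  unfold sufD
  rw [List.drop_eq_getElem_cons h]
  simp only [List.foldl_cons, Int.zero_add]
  rw [dog_shift]

lemma suf_length (animals : List String) : sufD animals animals.length = 0 := by
  simp [sufD]

lemma preD_zero (animals : List String) : preD animals 0 = 0 := by
  simp [preD]

lemma total_split (animals : List String) (k : Nat) :
    preD animals animals.length = preD animals k + sufD animals k := by
  unfold preD sufD
  rw [List.take_length]
  conv_lhs => rw [← List.take_append_drop k animals]
  rw [List.foldl_append, dog_shift]

-- the two count_dogs loops, as folds with fixed step
def stepR (animals : List String) (st : List Int × Int) (i : Int) : List Int × Int :=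
  let dc := st.2 + dogv (PySem.List.pyGetD animals (i + 1) "")
  (dc :: st.1, dc)

def stepL (animals : List String) (st : List Int × Int) (i : Int) : List Int × Int :=
  let dc := st.2 + dogv (PySem.List.pyGetD animals (i + -1) "")
  (st.1 ++ [dc], dc)

lemma count_dogs_neg (animals : List String) (a : Int) :
    count_dogs animals a (-1) (-1)
      = ((PySem.List.pyRange a (-1) (-1)).foldl (stepR animals) ([0], 0)).1 := by
  simp only [count_dogs]
  congr 2

lemma count_dogs_pos (animals : List String) (a b : Int) :
    count_dogs animals a b 1
      = ((PySem.List.pyRange a b 1).foldl (stepL animals) ([0], 0)).1 := by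
  simp only [count_dogs]
  congr 2

lemma loopR_eq (animals : List String) :
    ∀ (m : Nat) (dcs : List Int), m < animals.length →
      (PySem.List.pyRange ((m : Int) - 1) (-1) (-1)).foldl (stepR animals)
          (dcs, sufD animals (m + 1))
        = ((List.range m).map (fun j => sufD animals (j + 1)) ++ dcs, sufD animals 1) := by
  intro m
  induction m with
  | zero =>
      intro dcs _
      rw [show ((0 : Nat) : Int) - 1 = -1 by norm_num,
        PySem.List.pyRange_neg_one_eq_nil (by norm_num)]
      simp
  | succ m ih =>
      intro dcs hm
      have hm' : m + 1 < animals.length := hm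
      rw [show ((m + 1 : Nat) : Int) - 1 = (m : Int) by push_cast; ring,
        PySem.List.pyRange_neg_one_cons (by omega)]
      simp only [List.foldl_cons]
      have hget : PySem.List.pyGetD animals ((m : Int) + 1) "" = animals[m + 1] := by
        rw [show ((m : Int) + 1) = ((m + 1 : Nat) : Int) by push_cast; ring,
          PySem.List.pyGetD_natCast, List.getD_eq_getElem?_getD, List.getElem?_eq_getElem hm']
        rfl
      have hdc : stepR animals (dcs, sufD animals (m + 1 + 1)) (m : Int)
          = (sufD animals (m + 1) :: dcs, sufD animals (m + 1)) := by
        simp only [stepR, hget]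
        rw [suf_succ animals (m + 1) hm',
          Int.add_comm (dogv animals[m + 1]) (sufD animals (m + 1 + 1))]
      rw [hdc, ih (sufD animals (m + 1) :: dcs) (by omega)]
      rw [List.range_succ]
      simp

lemma loopL_eq (animals : List String) :
    ∀ (c : Nat), ∀ (s : Nat) (dcs : List Int), 1 ≤ s → s + c = animals.length →
      (PySem.List.pyRange (s : Int) (animals.length : Int) 1).foldl (stepL animals)
          (dcs, preD animals (s - 1))
        = (dcs ++ (List.range c).map (fun j => preD animals (s + j)),
           preD animals (animals.length - 1)) := by
  intro c
  induction c with
  | zero =>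
      intro s dcs hs hlen
      rw [PySem.List.pyRange_one_eq_nil (by omega)]
      simp only [List.foldl_nil, List.range_zero, List.map_nil, List.append_nil]
      have : s = animals.length := by omega
      subst this
      rfl
  | succ c ih =>
      intro s dcs hs hlen
      have hslt : s < animals.length := by omega
      have hs1 : s - 1 < animals.length := by omega
      rw [PySem.List.pyRange_one_cons (by omega)]
      simp only [List.foldl_cons]
      have hget : PySem.List.pyGetD animals ((s : Int) + -1) "" = animals[s - 1] := by
        rw [show ((s : Int) + -1) = ((s - 1 : Nat) : Int) by omega,
          PySem.List.pyGetD_natCast, List.getD_eq_getElem?_getD, List.getElem?_eq_getElem hs1]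
        rfl
      have hps : preD animals (s - 1) + dogv animals[s - 1] = preD animals s := by
        have h := (pre_succ animals (s - 1) hs1).symm
        rwa [show (s - 1) + 1 = s by omega] at h
      have hdc : stepL animals (dcs, preD animals (s - 1)) (s : Int)
          = (dcs ++ [preD animals s], preD animals s) := by
        simp only [stepL, hget]
        rw [hps]
      rw [hdc]
      have hIH := ih (s + 1) (dcs ++ [preD animals s]) (by omega) (by omega)
      simp only [Nat.add_sub_cancel, Nat.cast_add, Nat.cast_one] at hIH
      rw [hIH]
      have hmap : (List.range (c + 1)).map (fun j => preD animals (s + j))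
          = preD animals s :: (List.range c).map (fun j => preD animals (s + 1 + j)) := by
        rw [List.range_succ_eq_map, List.map_cons, List.map_map]
        simp only [Nat.add_zero]
        congr 1
        exact List.map_congr_left (fun j _ => by simp only [Function.comp]; congr 1; omega)
      rw [hmap]
      simp

-- lookups in the materialised lists
lemma R_get (animals : List String) (i : Nat) (h : i < animals.length) :
    PySem.List.pyGetD (count_dogs animals ((animals.length : Int) - 2) (-1) (-1)) (i : Int) 0
      = sufD animals (i + 1) := by
  have hn : 1 ≤ animals.length := by omega
  have hz : sufD animals (animals.length - 1 + 1) = 0 := by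
    rw [show animals.length - 1 + 1 = animals.length by omega]; exact suf_length animals
  have hfold := loopR_eq animals (animals.length - 1) [0] (by omega)
  rw [hz] at hfold
  rw [count_dogs_neg,
    show ((animals.length : Int) - 2) = ((animals.length - 1 : Nat) : Int) - 1 by omega, hfold]
  simp only [PySem.List.pyGetD_natCast]
  rcases Nat.lt_or_ge i (animals.length - 1) with hi | hi
  · rw [List.getD_eq_getElem?_getD, List.getElem?_append_left (by simp [hi]),
      List.getElem?_map, List.getElem?_range hi]
    rfl
  · have hieq : i = animals.length - 1 := by omega
    subst hieq
    rw [List.getD_eq_getElem?_getD, List.getElem?_append_right (by simp)]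
    simp [← hz]

lemma L_get (animals : List String) (i : Nat) (h : i < animals.length) :
    PySem.List.pyGetD (count_dogs animals 1 (animals.length : Int) 1) (i : Int) 0
      = preD animals i := by
  have hn : 1 ≤ animals.length := by omega
  have hfold := loopL_eq animals (animals.length - 1) 1 [0] (by omega) (by omega)
  rw [show (1 : Nat) - 1 = 0 from rfl, preD_zero, Nat.cast_one] at hfold
  rw [count_dogs_pos, hfold]
  simp only [PySem.List.pyGetD_natCast]
  cases i with
  | zero => simp [preD_zero]
  | succ j =>
      rw [List.getD_eq_getElem?_getD]
      simp only [List.singleton_append, List.getElem?_cons_succ]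
      rw [List.getElem?_map, List.getElem?_range (by omega)]
      simp [Nat.add_comm]

-- the two top-level passes, as folds
def stepA (animals : List String) (gc : Int) (i : Int) : Int :=
  let a := PySem.List.pyGetD animals i ""
  let diff := if a ∈ (["cat", "dog"] : List String) then
      PySem.List.pyGetD (count_dogs animals 1 (animals.length : Int) 1) i 0
    else PySem.List.pyGetD (count_dogs animals ((animals.length : Int) - 2) (-1) (-1)) i 0
  gc + (if diff > 0 then 1 else 0)

def totalD (animals : List String) : Int := preD animals animals.length

def stepB (animals : List String) (st : Int × Int) (a : String) : Int × Int :=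
  let cur := dogv a
  ((if a ∈ (["cat", "dog"] : List String) then (if st.2 > 0 then st.1 + 1 else st.1)
    else (if totalD animals - st.2 - cur > 0 then st.1 + 1 else st.1)), st.2 + cur)

lemma growlers_eq_foldA (animals : List String) :
    count_growlers animals
      = (PySem.List.pyRange 0 (animals.length : Int) 1).foldl (stepA animals) 0 := by
  simp only [count_growlers]
  congr 1

lemma alt_eq_foldB (animals : List String) :
    count_growlers_alt animals = (animals.foldl (stepB animals) (0, 0)).1 := by
  simp only [count_growlers_alt]
  congr 2
  funext st a
  simp only [stepB, totalD, preD, dogv, List.take_length]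

lemma main_loop (animals : List String) :
    ∀ (c k : Nat) (gc : Int), k + c = animals.length →
      (PySem.List.pyRange (k : Int) (animals.length : Int) 1).foldl (stepA animals) gc
        = ((animals.drop k).foldl (stepB animals) (gc, preD animals k)).1 := by
  intro c
  induction c with
  | zero =>
      intro k gc hlen
      rw [PySem.List.pyRange_one_eq_nil (by omega)]
      have : k = animals.length := by omega
      subst this
      simp
  | succ c ih =>
      intro k gc hlen
      have hk : k < animals.length := by omega
      rw [PySem.List.pyRange_one_cons (by omega), List.drop_eq_getElem_cons hk]
      simp only [List.foldl_cons]
      have hget : PySem.List.pyGetD animals (k : Int) "" = animals[k] := by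
        simp [PySem.List.pyGetD_natCast, List.getD_eq_getElem?_getD, List.getElem?_eq_getElem hk]
      have hkey : totalD animals - preD animals k - dogv animals[k] = sufD animals (k + 1) := by
        have h1 := total_split animals (k + 1)
        have h2 := pre_succ animals k hk
        unfold totalD
        omega
      have hstep : stepA animals gc (k : Int)
          = (stepB animals (gc, preD animals k) animals[k]).1 := by
        simp only [stepA, stepB, hget, hkey, L_get animals k hk, R_get animals k hk]
        split_ifs <;> omega
      have hsnd : (stepB animals (gc, preD animals k) animals[k]).2 = preD animals (k + 1) := by
        simp only [stepB]
        rw [pre_succ animals k hk]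
      rw [show ((k : Int) + 1) = ((k + 1 : Nat) : Int) by push_cast; ring]
      have := ih (k + 1) (stepA animals gc (k : Int)) (by omega)
      rw [this, hstep]
      congr 1
      rw [← hsnd]

-- ===== VERDICT (by name: the statement is the Claim_ definition above) =====
theorem count_growlers_spec : Claim_equal_count_growlers := by
  intro animals _
  unfold Spec_count_growlers
  rw [growlers_eq_foldA, alt_eq_foldB]
  have h := main_loop animals animals.length 0 0 (by omega)
  simpa [preD_zero] using h
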